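-- pv_equiv track=rewrite | github.com/founek2/description-crawler | src/server_impl.py | prefer_wiki
-- ===== SOURCE A (Python) =====
-- def prefer_wiki(links):
--     result = []
--     rest = []
--     for link in links:
--         if "wiki" in link:
--             result.append(link)
--         else:
--             rest.append(link)
--
--     return result + rest
-- ===== SOURCE B (Python) =====
-- def prefer_wiki(links):
--     return sorted(links, key=lambda l: "wiki" not in l)
-- ===== Notes on version B (the rewrite author's own statement) =====
-- stated objective: idiomatic
-- what changed: Replaced the manual two-accumulator partition pass with a single call to Python's stable sort keyed on '"wiki" not in l', which places wiki-containing links first while preserving relative order.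
import Mathlib
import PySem

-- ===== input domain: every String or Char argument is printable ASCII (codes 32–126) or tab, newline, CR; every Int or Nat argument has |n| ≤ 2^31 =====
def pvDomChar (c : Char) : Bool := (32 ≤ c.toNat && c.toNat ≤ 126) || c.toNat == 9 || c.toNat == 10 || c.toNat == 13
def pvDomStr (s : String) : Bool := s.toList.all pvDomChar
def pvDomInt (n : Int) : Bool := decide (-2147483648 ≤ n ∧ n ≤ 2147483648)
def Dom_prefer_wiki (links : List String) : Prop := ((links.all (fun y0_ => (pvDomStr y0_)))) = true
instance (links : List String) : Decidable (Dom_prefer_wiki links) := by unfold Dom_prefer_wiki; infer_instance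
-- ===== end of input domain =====

-- B replaces A's two-accumulator partition loop with one stable sort keyed on "wiki" not in link (idiomatic one-liner; same result).

-- ===== PORT A =====
def prefer_wiki (links : List String) : List String :=
  let p := links.foldl
    (fun (acc : List String × List String) link =>
      if PySem.Str.isIn "wiki" link then (acc.1 ++ [link], acc.2)
      else (acc.1, acc.2 ++ [link]))
    ([], [])
  p.1 ++ p.2

-- ===== PORT B =====
def prefer_wiki_alt (links : List String) : List String :=
  PySem.List.sorted links (fun l => !(PySem.Str.isIn "wiki" l)) false

-- ===== PRECONDITION & SPEC =====
def Spec_prefer_wiki (links : List String) (out : List String) : Prop := out = prefer_wiki_alt links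
instance (links : List String) (out : List String) : Decidable (Spec_prefer_wiki links out) := by unfold Spec_prefer_wiki; infer_instance

-- ===== CLAIM (what is proved, stated in full; the proofs are below) =====
def Claim_equal_prefer_wiki : Prop := ∀ (links : List String), Dom_prefer_wiki links → Spec_prefer_wiki links (prefer_wiki links)

-- ===== LEMMAS AND PROOFS =====

-- A's loop builds (filter p, filter !p)
theorem prefer_wiki_foldA (p : String → Bool) (l : List String) (acc : List String × List String) :
    l.foldl (fun acc link => if p link then (acc.1 ++ [link], acc.2) else (acc.1, acc.2 ++ [link])) acc
      = (acc.1 ++ l.filter p, acc.2 ++ l.filter (fun x => !p x)) := by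
  induction l generalizing acc with
  | nil => simp
  | cons x t ih =>
    by_cases h : p x = true <;> simp [List.foldl, h, ih]

-- one insertBy step into a partitioned list
theorem insertBy_partition (p : String → Bool) (x : String) (A B : List String)
    (hA : ∀ a ∈ A, p a = true) (hB : ∀ b ∈ B, p b = false) :
    PySem.List.insertBy (fun a b => decide ((!(p a)) < (!(p b)))) x (A ++ B)
      = if p x then A ++ x :: B else A ++ B ++ [x] := by
  by_cases hx : p x = true
  · simp only [hx, if_pos]
    induction A with
    | nil =>
      cases B with
      | nil => simp [PySem.List.insertBy]
      | cons b B' =>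
        have hb : p b = false := hB b (by simp)
        simp [PySem.List.insertBy, hx, hb]
    | cons a A' ih =>
      have ha : p a = true := hA a (by simp)
      have ih' := ih (fun a h => hA a (by simp [h]))
      simp only [List.cons_append, PySem.List.insertBy, hx, ha]
      simp [ih']
  · have hx' : p x = false := by simpa using hx
    simp only [hx', Bool.false_eq_true, if_neg, not_false_iff]
    rw [PySem.List.insertBy_of_forall_not_before]
    intro y hy
    simp [hx']

-- the stable-sort fold keeps the partition invariant
theorem sorted_fold_partition (p : String → Bool) (l : List String) (A B : List String)
    (hA : ∀ a ∈ A, p a = true) (hB : ∀ b ∈ B, p b = false) :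
    l.foldl (fun acc x => PySem.List.insertBy (fun a b => decide ((!(p a)) < (!(p b)))) x acc) (A ++ B)
      = (A ++ l.filter p) ++ (B ++ l.filter (fun x => !p x)) := by
  induction l generalizing A B with
  | nil => simp
  | cons x t ih =>
    simp only [List.foldl]
    rw [insertBy_partition p x A B hA hB]
    by_cases hx : p x = true
    · rw [if_pos hx]
      have hA' : ∀ a ∈ A ++ [x], p a = true := by
        intro a ha
        rcases List.mem_append.mp ha with h | h
        · exact hA a h
        · simp at h; simpa [h]
      have e : A ++ x :: B = (A ++ [x]) ++ B := by simp
      rw [e, ih (A ++ [x]) B hA' hB]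
      simp [hx]
    · have hx' : p x = false := by simpa using hx
      rw [if_neg (by simp [hx'])]
      have hB' : ∀ b ∈ B ++ [x], p b = false := by
        intro b hb
        rcases List.mem_append.mp hb with h | h
        · exact hB b h
        · simp at h; simpa [h]
      rw [List.append_assoc, ih A (B ++ [x]) hA hB']
      simp [hx']

-- ===== VERDICT (by name: the statement is the Claim_ definition above) =====
theorem prefer_wiki_spec : Claim_equal_prefer_wiki := by
  intro links _
  have h := sorted_fold_partition (fun l => PySem.Str.isIn "wiki" l) links [] []
    (by intro a ha; simp at ha) (by intro b hb; simp at hb)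
  simp only [List.nil_append] at h
  unfold Spec_prefer_wiki prefer_wiki prefer_wiki_alt
  rw [PySem.List.sorted_eq_foldl_insertBy]
  rw [prefer_wiki_foldA (fun l => PySem.Str.isIn "wiki" l) links ([], [])]
  simp only [List.nil_append]
  exact h.symm
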